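-- pv_equiv track=rewrite | github.com/M-LN/Regime-aware-predictive-pipeline | src/monitoring/alerting.py | should_send_alert
-- ===== SOURCE A (Python) =====
-- from typing import Dict, List
--
-- SEVERITY_ORDER = {
--     "low": 0,
--     "medium": 1,
--     "high": 2
-- }
--
-- def should_send_alert(alerts: List[Dict], min_severity: str) -> bool:
--     if not alerts:
--         return False
--
--     min_level = SEVERITY_ORDER.get(min_severity.lower(), 1)
--     for alert in alerts:
--         severity = alert.get("severity", "low").lower()
--         if SEVERITY_ORDER.get(severity, 0) >= min_level:
--             return True
--
--     return False
-- ===== SOURCE B (Python) =====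
-- SEVERITY_ORDER = {
--     "low": 0,
--     "medium": 1,
--     "high": 2
-- }
--
-- def should_send_alert(alerts, min_severity):
--     if not alerts:
--         return False
--     min_level = SEVERITY_ORDER.get(min_severity.lower(), 1)
--     if min_level <= 0:
--         # every severity maps to a level >= 0, and there is at least one alert
--         return True
--     qualifying = {name for name, level in SEVERITY_ORDER.items() if level >= min_level}
--     present = {alert.get("severity", "low").lower() for alert in alerts}
--     return not present.isdisjoint(qualifying)
-- ===== Notes on version B (the rewrite author's own statement) =====
-- stated objective: alternative
-- what changed: Instead of scanning alerts and comparing numeric levels with an early return, B classifies the threshold first (threshold 0 answers True immediately), precomputes the SET of severity names that qualify, collects the SET of distinct severity names present, and answers by set disjointness.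
import Mathlib
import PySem

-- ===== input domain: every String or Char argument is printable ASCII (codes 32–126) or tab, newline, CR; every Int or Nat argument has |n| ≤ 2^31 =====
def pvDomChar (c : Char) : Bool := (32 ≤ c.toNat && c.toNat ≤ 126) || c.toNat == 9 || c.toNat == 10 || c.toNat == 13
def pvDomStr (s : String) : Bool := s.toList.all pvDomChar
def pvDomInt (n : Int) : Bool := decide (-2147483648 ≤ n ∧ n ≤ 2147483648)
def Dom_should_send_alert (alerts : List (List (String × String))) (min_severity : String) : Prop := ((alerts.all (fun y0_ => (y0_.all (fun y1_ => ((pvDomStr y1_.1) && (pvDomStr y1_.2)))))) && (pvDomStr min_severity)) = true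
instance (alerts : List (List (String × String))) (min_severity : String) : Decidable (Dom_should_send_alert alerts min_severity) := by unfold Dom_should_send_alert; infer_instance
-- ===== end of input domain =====

-- B answers True immediately for threshold 0, else intersects the set of severity names present with the precomputed set of qualifying names; same cost, different structure.
-- ===== PORT A =====
-- SEVERITY_ORDER as a dict, and SEVERITY_ORDER.get(s, d)
def pvSevOrder : PySem.Dict String Int :=
  PySem.Dict.mk [("low", (0 : Int)), ("medium", 1), ("high", 2)]

def pvSevGet (s : String) (d : Int) : Int := PySem.Dict.getD pvSevOrder s d

-- the `for alert in alerts: ... return True` loop of A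
def pvLoopA (min_level : Int) : List (List (String × String)) → Bool
  | [] => false
  | alert :: rest =>
    let severity := PySem.Str.lower (PySem.Dict.getD (PySem.Dict.mk alert) "severity" "low")
    if pvSevGet severity 0 ≥ min_level then true else pvLoopA min_level rest

def should_send_alert (alerts : List (List (String × String))) (min_severity : String) : Bool :=
  if alerts.isEmpty then false
  else pvLoopA (pvSevGet (PySem.Str.lower min_severity) 1) alerts

-- ===== PORT B =====
-- alert.get("severity", "low").lower()
def pvSevName (alert : List (String × String)) : String :=
  PySem.Str.lower (PySem.Dict.getD (PySem.Dict.mk alert) "severity" "low")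

-- {name for name, level in SEVERITY_ORDER.items() if level >= min_level}
def pvQualifying (min_level : Int) : PySem.Set String :=
  PySem.Set.ofList ((pvSevOrder.items.filter (fun p => decide (p.2 ≥ min_level))).map Prod.fst)

def should_send_alert_alt (alerts : List (List (String × String))) (min_severity : String) : Bool :=
  if alerts.isEmpty then false
  else
    let min_level := pvSevGet (PySem.Str.lower min_severity) 1
    if min_level ≤ 0 then true
    else
      let qualifying := pvQualifying min_level
      let present := PySem.Set.ofList (alerts.map pvSevName)
      !(PySem.Set.isdisjoint present qualifying)

-- ===== PRECONDITION & SPEC =====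
def Spec_should_send_alert (alerts : List (List (String × String))) (min_severity : String) (out : Bool) : Prop := out = should_send_alert_alt alerts min_severity
instance (alerts : List (List (String × String))) (min_severity : String) (out : Bool) : Decidable (Spec_should_send_alert alerts min_severity out) := by unfold Spec_should_send_alert; infer_instance

-- ===== CLAIM (what is proved, stated in full; the proofs are below) =====
def Claim_equal_should_send_alert : Prop := ∀ (alerts : List (List (String × String))) (min_severity : String), Dom_should_send_alert alerts min_severity → Spec_should_send_alert alerts min_severity (should_send_alert alerts min_severity)

-- ===== LEMMAS AND PROOFS =====

-- A's short-circuit loop is `any` of the per-alert test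
lemma pvLoopA_any (m : Int) (xs : List (List (String × String))) :
    pvLoopA m xs = xs.any (fun a => decide (pvSevGet (pvSevName a) 0 ≥ m)) := by
  induction xs with
  | nil => rfl
  | cons a t ih =>
      simp only [pvLoopA, List.any_cons, ← ih]
      split_ifs with h <;> simp [pvSevName, h]

-- `any` over the deduplicated set equals `any` over the original list
lemma any_ofList {α : Type} [BEq α] [LawfulBEq α] (xs : List α) (p : α → Bool) :
    (PySem.Set.ofList xs).any p = xs.any p := by
  rw [Bool.eq_iff_iff]
  simp only [List.any_eq_true]
  constructor
  · rintro ⟨x, hx, hp⟩; exact ⟨x, (PySem.Set.mem_ofList xs x).mp hx, hp⟩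
  · rintro ⟨x, hx, hp⟩; exact ⟨x, (PySem.Set.mem_ofList xs x).mpr hx, hp⟩

-- SEVERITY_ORDER.get(s, d) is one of the three values or the default
lemma pvSevGet_cases (s : String) (d : Int) :
    pvSevGet s d = 0 ∨ pvSevGet s d = 1 ∨ pvSevGet s d = 2 ∨ pvSevGet s d = d := by
  by_cases h0 : "low" = s
  · subst h0; simp [pvSevGet, pvSevOrder, PySem.Dict.getD, PySem.Dict.get?]
  by_cases h1 : "medium" = s
  · subst h1; simp [pvSevGet, pvSevOrder, PySem.Dict.getD, PySem.Dict.get?, List.find?]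
  by_cases h2 : "high" = s
  · subst h2; simp [pvSevGet, pvSevOrder, PySem.Dict.getD, PySem.Dict.get?, List.find?]
  have b0 := beq_eq_false_iff_ne.mpr h0
  have b1 := beq_eq_false_iff_ne.mpr h1
  have b2 := beq_eq_false_iff_ne.mpr h2
  simp [pvSevGet, pvSevOrder, PySem.Dict.getD, PySem.Dict.get?, List.find?, b0, b1, b2]

-- membership in the qualifying set matches the numeric test, for the two positive thresholds
lemma contains_qualifying (m : Int) (hm : m = 1 ∨ m = 2) (s : String) :
    (pvQualifying m).contains s = decide (pvSevGet s 0 ≥ m) := by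
  have key : ∀ t : String, pvSevGet t 0 =
      (Option.map Prod.snd (List.find? (fun p => p.1 == t)
        [("low", (0:Int)), ("medium", 1), ("high", 2)])).getD 0 := by
    intro t; rfl
  rcases hm with rfl | rfl <;>
  · by_cases h0 : "low" = s
    · subst h0; decide
    by_cases h1 : "medium" = s
    · subst h1; decide
    by_cases h2 : "high" = s
    · subst h2; decide
    have b0 := beq_eq_false_iff_ne.mpr h0
    have b1 := beq_eq_false_iff_ne.mpr h1
    have b2 := beq_eq_false_iff_ne.mpr h2
    have c1 := beq_eq_false_iff_ne.mpr (fun h => h1 h.symm)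
    have c2 := beq_eq_false_iff_ne.mpr (fun h => h2 h.symm)
    have R : decide (pvSevGet s 0 ≥ (2:Int)) = false ∧ decide (pvSevGet s 0 ≥ (1:Int)) = false := by
      rw [key]; simp [List.find?, b0, b1, b2]
    have L1 : PySem.Set.contains ["medium", "high"] s = false := by
      show List.contains ["medium", "high"] s = false
      simp [List.contains, List.elem, c1, c2]
    have L2 : PySem.Set.contains ["high"] s = false := by
      show List.contains ["high"] s = false
      simp [List.contains, List.elem, c2]
    first
      | (show PySem.Set.contains ["medium", "high"] s = _; rw [L1, R.2])
      | (show PySem.Set.contains ["high"] s = _; rw [L2, R.1])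

-- ===== VERDICT (by name: the statement is the Claim_ definition above) =====
theorem should_send_alert_spec : Claim_equal_should_send_alert := by
  intro alerts min_severity _
  unfold Spec_should_send_alert should_send_alert should_send_alert_alt
  cases alerts with
  | nil => rfl
  | cons a t =>
      simp only [List.isEmpty_cons, Bool.false_eq_true, if_false]
      set m := pvSevGet (PySem.Str.lower min_severity) 1 with hm
      have hmv : m = 0 ∨ m = 1 ∨ m = 2 := by
        rcases pvSevGet_cases (PySem.Str.lower min_severity) 1 with h | h | h | h <;>
          simp [hm, h]
      rw [pvLoopA_any]
      by_cases hle : m ≤ 0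
      · -- threshold 0: the first alert already qualifies
        have h0 : m = 0 := by omega
        have : 0 ≤ pvSevGet (pvSevName a) 0 := by
          rcases pvSevGet_cases (pvSevName a) 0 with h | h | h | h <;> omega
        simp [h0, List.any_cons, this]
      · have hm12 : m = 1 ∨ m = 2 := by omega
        simp only [hle, if_false, PySem.Set.isdisjoint, Bool.not_not]
        rw [any_ofList, List.any_map]
        refine congrArg _ (funext fun al => ?_)
        exact (contains_qualifying m hm12 (pvSevName al)).symm
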